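-- pv_equiv track=rewrite | github.com/ghagshubham/agent_ai | agents/visualizer.py | _generate_temporal_insights
-- ===== SOURCE A (Python) =====
-- from typing import Dict, Any, List, Optional, Tuple
-- from collections import Counter, defaultdict
--
-- def _generate_temporal_insights(years: List[int], extracted_data: Dict[str, List]) -> List[str]:
--     """Generate insights from temporal analysis"""
--     insights = []
--
--     if years:
--         year_range = max(years) - min(years)
--         insights.append(f"Research spans {year_range} years from {min(years)} to {max(years)}")
--
--         year_counts = Counter(years)
--         peak_year = max(year_counts, key=year_counts.get)
--         insights.append(f"Peak research activity occurred in {peak_year} with {year_counts[peak_year]} publications")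
--
--         recent_years = [y for y in years if y >= 2020]
--         insights.append(f"{len(recent_years)} out of {len(years)} publications are from 2020 onwards")
--
--     return insights
-- ===== SOURCE B (Python) =====
-- def _generate_temporal_insights(years, extracted_data):
--     if not years:
--         return []
--     it = iter(years)
--     first = next(it)
--     lo = hi = first
--     counts = {first: 1}
--     recent = 1 if first >= 2020 else 0
--     total = 1
--     for y in it:
--         if y < lo:
--             lo = y
--         if hi < y:
--             hi = y
--         counts[y] = counts.get(y, 0) + 1
--         if y >= 2020:
--             recent += 1
--         total += 1
--     peak = max(counts, key=counts.get)
--     return [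
--         f"Research spans {hi - lo} years from {lo} to {hi}",
--         f"Peak research activity occurred in {peak} with {counts[peak]} publications",
--         f"{recent} out of {total} publications are from 2020 onwards",
--     ]
-- ===== Notes on version B (the rewrite author's own statement) =====
-- stated objective: alternative
-- what changed: B replaces A's repeated whole-list passes (max, min, Counter, filter) by one explicit loop maintaining running min/max, a first-appearance count dict, a recent counter and a total, then derives the peak year from the accumulated dict exactly as A does.
import Mathlib
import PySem

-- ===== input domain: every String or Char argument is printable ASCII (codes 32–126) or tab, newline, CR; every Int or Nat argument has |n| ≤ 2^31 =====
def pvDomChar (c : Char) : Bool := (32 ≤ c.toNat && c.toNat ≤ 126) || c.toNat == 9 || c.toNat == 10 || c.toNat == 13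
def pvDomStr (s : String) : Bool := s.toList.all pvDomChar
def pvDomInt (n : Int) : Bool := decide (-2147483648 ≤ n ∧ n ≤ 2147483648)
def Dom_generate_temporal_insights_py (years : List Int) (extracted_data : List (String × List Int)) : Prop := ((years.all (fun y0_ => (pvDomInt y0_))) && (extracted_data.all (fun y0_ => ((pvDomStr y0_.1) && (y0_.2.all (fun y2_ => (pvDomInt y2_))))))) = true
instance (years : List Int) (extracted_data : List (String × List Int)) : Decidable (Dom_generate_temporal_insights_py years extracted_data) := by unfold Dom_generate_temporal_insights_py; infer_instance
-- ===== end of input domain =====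

-- B folds A's separate passes (max, min, Counter, recent filter) into one explicit loop; the peak year
-- is derived from the accumulated dict afterwards, so the tie-break is A's (first-appearance order).


-- ===== PORT A =====
def generate_temporal_insights_py (years : List Int) (extracted_data : List (String × List Int)) : List String :=
  let insights : List String := []
  if years = [] then insights
  else
    -- max(years)/min(years); years ≠ [] here, so max?/min? are some and the default 0 is never used
    let mx : Int := (PySem.List.max? years (fun y => y)).getD 0
    let mn : Int := (PySem.List.min? years (fun y => y)).getD 0
    let year_range := mx - mn
    let insights := insights ++ ["Research spans " ++ PySem.Int.toStr year_range ++ " years from " ++ PySem.Int.toStr mn ++ " to " ++ PySem.Int.toStr mx]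
    let year_counts := PySem.Dict.counter years
    -- max(year_counts, key=year_counts.get); keys nonempty since years ≠ [], default 0 never used
    let peak_year : Int := (PySem.List.max? year_counts.keys (fun k => year_counts.getD k 0)).getD 0
    let insights := insights ++ ["Peak research activity occurred in " ++ PySem.Int.toStr peak_year ++ " with " ++ PySem.Int.toStr (year_counts.getD peak_year 0) ++ " publications"]
    let recent_years := years.filter (fun y => decide (2020 ≤ y))
    insights ++ [PySem.Int.toStr recent_years.length ++ " out of " ++ PySem.Int.toStr years.length ++ " publications are from 2020 onwards"]

-- ===== PORT B =====
-- B's loop: state (lo, hi, counts, recent, total), one pass over the remaining years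
def tiLoop : List Int → Int → Int → PySem.Dict Int Int → Int → Int → Int × Int × PySem.Dict Int Int × Int × Int
  | [], lo, hi, d, rec_, tot => (lo, hi, d, rec_, tot)
  | y :: ys, lo, hi, d, rec_, tot =>
      tiLoop ys (if y < lo then y else lo) (if hi < y then y else hi)
        (d.insert y (d.getD y 0 + 1)) (if 2020 ≤ y then rec_ + 1 else rec_) (tot + 1)

def generate_temporal_insights_py_alt (years : List Int) (extracted_data : List (String × List Int)) : List String :=
  match years with
  | [] => []
  | first :: rest =>
    let st := tiLoop rest first first ((PySem.Dict.empty).insert first 1) (if 2020 ≤ first then 1 else 0) 1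
    let lo := st.1
    let hi := st.2.1
    let counts := st.2.2.1
    let recent := st.2.2.2.1
    let total := st.2.2.2.2
    let peak : Int := (PySem.List.max? counts.keys (fun k => counts.getD k 0)).getD 0
    [ "Research spans " ++ PySem.Int.toStr (hi - lo) ++ " years from " ++ PySem.Int.toStr lo ++ " to " ++ PySem.Int.toStr hi,
      "Peak research activity occurred in " ++ PySem.Int.toStr peak ++ " with " ++ PySem.Int.toStr (counts.getD peak 0) ++ " publications",
      PySem.Int.toStr recent ++ " out of " ++ PySem.Int.toStr total ++ " publications are from 2020 onwards" ]

-- ===== PRECONDITION & SPEC =====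
def Spec_generate_temporal_insights_py (years : List Int) (extracted_data : List (String × List Int)) (out : List String) : Prop := out = generate_temporal_insights_py_alt years extracted_data
instance (years : List Int) (extracted_data : List (String × List Int)) (out : List String) : Decidable (Spec_generate_temporal_insights_py years extracted_data out) := by unfold Spec_generate_temporal_insights_py; infer_instance

-- ===== CLAIM (what is proved, stated in full; the proofs are below) =====
def Claim_equal_generate_temporal_insights_py : Prop := ∀ (years : List Int) (extracted_data : List (String × List Int)), Dom_generate_temporal_insights_py years extracted_data → Spec_generate_temporal_insights_py years extracted_data (generate_temporal_insights_py years extracted_data)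

-- ===== LEMMAS AND PROOFS =====
-- the combined loop equals the tuple of A's separate passes
theorem tiLoop_eq (ys : List Int) (lo hi : Int) (d : PySem.Dict Int Int) (rec_ tot : Int) :
    tiLoop ys lo hi d rec_ tot =
      (ys.foldl min lo, ys.foldl max hi,
       ys.foldl (fun d y => d.insert y (d.getD y 0 + 1)) d,
       rec_ + (ys.filter (fun y => decide (2020 ≤ y))).length,
       tot + ys.length) := by
  induction ys generalizing lo hi d rec_ tot with
  | nil => simp [tiLoop]
  | cons y ys ih =>
    simp only [tiLoop, ih, List.foldl_cons, List.filter_cons, List.length_cons]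
    simp only [Prod.mk.injEq]
    refine ⟨?_, ?_, trivial, ?_, by push_cast; omega⟩
    · congr 1; simp only [min_def]; split_ifs <;> omega
    · congr 1; simp only [max_def]; split_ifs <;> omega
    · split_ifs <;> push_cast <;> simp_all <;> omega

theorem generate_temporal_insights_py_spec : Claim_equal_generate_temporal_insights_py := by
  intro years extracted_data _
  unfold Spec_generate_temporal_insights_py generate_temporal_insights_py generate_temporal_insights_py_alt
  cases years with
  | nil => simp
  | cons y ys =>
    simp only [reduceCtorEq, if_false]
    rw [tiLoop_eq]
    have hcnt : (PySem.Dict.empty.insert y 1 : PySem.Dict Int Int) =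
        (PySem.Dict.empty).insert y ((PySem.Dict.empty : PySem.Dict Int Int).getD y 0 + 1) := by
      simp [PySem.Dict.getD_empty]
    have hdict : ys.foldl (fun d y => d.insert y (d.getD y 0 + 1))
        ((PySem.Dict.empty : PySem.Dict Int Int).insert y 1) = PySem.Dict.counter (y :: ys) := by
      rw [hcnt, ← PySem.Dict.foldl_insert_getD_add_one_eq_counter]
      simp [List.foldl_cons]
    have hmax : PySem.List.max? (y :: ys) (fun z => z) = some (ys.foldl max y) :=
      PySem.List.max?_id_cons ..
    have hmin : PySem.List.min? (y :: ys) (fun z => z) = some (ys.foldl min y) :=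
      PySem.List.min?_id_cons ..
    have hrec : (if 2020 ≤ y then (1:Int) else 0) + ((ys.filter (fun z => decide (2020 ≤ z))).length : Int)
        = (((y :: ys).filter (fun z => decide (2020 ≤ z))).length : Int) := by
      simp only [List.filter_cons]
      split_ifs with h <;> push_cast <;> simp_all <;> omega
    simp only [hdict, hmax, hmin, hrec, Option.getD_some]
    simp [List.length_cons]
    congr 1
    omega
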